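-- pv_equiv track=rewrite | github.com/Imnotgoingtohindiclass/AMath-Phys-iPT_2025 | 07_analyse_received_sound_skeleton_codes.py | pulses_to_morse
-- ===== SOURCE A (Python) =====
-- interletter_space = '000'
--
-- interword_space = '0000000'
--
-- def pulses_to_morse(pulses, dot="1", dash="111"):
--     """
--     Convert a binary string to Morse code.
--
--     Parameters:
--     pulses - string of 0s and 1s
--     dot - binary pattern for a dot
--     dash - binary pattern for a dash
--
--     Returns:
--     morse_words - list of lists of morse code sequences, one list per word
--     """
--     # Split into words based on interword space
--     words = pulses.split(interword_space)
--     morse_words = []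
--
--     for word in words:
--         if not word:
--             continue
--
--         # Split into letters based on interletter space
--         letters = word.split(interletter_space)
--         morse_letters = []
--
--         for letter in letters:
--             if not letter:
--                 continue
--
--             # Convert binary to morse
--             morse = ""
--             i = 0
--             while i < len(letter):
--                 if letter[i:i+len(dot)] == dot:
--                     morse += "."
--                     i += len(dot)
--                 elif letter[i:i+len(dash)] == dash:
--                     morse += "-"
--                     i += len(dash)
--                 else:
--                     # Skip interelement space
--                     i += 1
--
--             if morse:
--                 morse_letters.append(morse)
--
--         if morse_letters:
--             morse_words.append(morse_letters)
--
--     return morse_words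
-- ===== SOURCE B (Python) =====
-- interletter_space = '000'
--
-- interword_space = '0000000'
--
-- def pulses_to_morse(pulses, dot="1", dash="111"):
--     """Same conversion, written as nested comprehensions over the two splits,
--     with a tokenizer that consumes the remaining suffix instead of moving an index."""
--     def tokenize(s):
--         symbols = []
--         while s:
--             if s.startswith(dot):
--                 symbols.append(".")
--                 s = s[len(dot):]
--             elif s.startswith(dash):
--                 symbols.append("-")
--                 s = s[len(dash):]
--             else:
--                 s = s[1:]
--         return "".join(symbols)
--
--     return [letters
--             for letters in ([m
--                              for m in (tokenize(l) for l in w.split(interletter_space))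
--                              if m]
--                             for w in pulses.split(interword_space))
--             if letters]
-- ===== Notes on version B (the rewrite author's own statement) =====
-- stated objective: alternative
-- what changed: The index-based greedy while-loop with string += accumulation is replaced by a suffix-consuming startswith tokenizer that collects symbols in a list joined once at the end, and the explicit outer loops with continue/append by nested filtering comprehensions; often measured faster (join vs repeated concatenation) but not claimed as such.
import Mathlib
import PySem

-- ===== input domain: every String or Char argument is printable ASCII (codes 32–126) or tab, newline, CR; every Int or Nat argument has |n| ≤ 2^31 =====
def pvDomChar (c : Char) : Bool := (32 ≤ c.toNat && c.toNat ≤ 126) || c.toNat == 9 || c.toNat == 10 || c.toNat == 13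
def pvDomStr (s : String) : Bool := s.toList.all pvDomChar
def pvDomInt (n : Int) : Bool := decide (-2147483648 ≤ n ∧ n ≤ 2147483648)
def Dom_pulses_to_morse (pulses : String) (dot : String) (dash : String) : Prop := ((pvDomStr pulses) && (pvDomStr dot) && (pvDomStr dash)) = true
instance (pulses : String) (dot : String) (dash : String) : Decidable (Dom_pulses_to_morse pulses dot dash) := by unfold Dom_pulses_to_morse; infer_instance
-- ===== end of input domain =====

-- B rewrites the index-based greedy scan as a suffix-consuming startswith tokenizer and
-- replaces the explicit accumulator loops by nested filtering comprehensions (alternative decomposition of the same task).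


-- ===== PORT A =====
-- A's inner while-loop: index i, string accumulator morse, slice comparisons.
-- fuel is a totality guard only: whenever dot and dash are nonempty, i grows by ≥ 1 per
-- iteration, so fuel = letter.length is enough and the port is exact; with an empty
-- dot/dash pattern the Python loops forever on any nonempty letter (it returns no value
-- there, so nothing is claimed about it) and the port stops when fuel runs out.
def aLoop (dt dh letter : List Char) (fuel : Nat) (i : Nat) (morse : List Char) : List Char :=
  match fuel with
  | 0 => morse
  | fuel + 1 =>
    if i < letter.length then
      if PySem.Chars.slice letter (some (i : Int)) (some ((i : Int) + (dt.length : Int))) = dt then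
        aLoop dt dh letter fuel (i + dt.length) (morse ++ ['.'])
      else if PySem.Chars.slice letter (some (i : Int)) (some ((i : Int) + (dh.length : Int))) = dh then
        aLoop dt dh letter fuel (i + dh.length) (morse ++ ['-'])
      else
        aLoop dt dh letter fuel (i + 1) morse
    else morse

def pulses_to_morse (pulses : String) (dot : String) (dash : String) : List (List String) :=
  let words := PySem.Chars.splitOn pulses.toList "0000000".toList
  words.foldl (fun morse_words word =>
    if word = [] then morse_words
    else
      let letters := PySem.Chars.splitOn word "000".toList
      let morse_letters := letters.foldl (fun morse_letters letter =>
        if letter = [] then morse_letters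
        else
          let morse := aLoop dot.toList dash.toList letter letter.length 0 []
          if morse = [] then morse_letters else morse_letters ++ [String.ofList morse]) []
      if morse_letters = [] then morse_words else morse_words ++ [morse_letters]) []

-- ===== PORT B =====
-- B's tokenizer consumes the remaining suffix with startswith tests, consing symbols.
-- fuel is the same totality guard (exact whenever dot and dash are nonempty, where each
-- step drops ≥ 1 char; B's Python loops forever exactly where A's does).
def bTok (dt dh : List Char) (s : List Char) (fuel : Nat) : List Char :=
  match fuel with
  | 0 => []
  | fuel + 1 =>
    if s = [] then []
    else if PySem.Chars.startswith s dt then '.' :: bTok dt dh (s.drop dt.length) fuel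
    else if PySem.Chars.startswith s dh then '-' :: bTok dt dh (s.drop dh.length) fuel
    else bTok dt dh (s.drop 1) fuel

def pulses_to_morse_alt (pulses : String) (dot : String) (dash : String) : List (List String) :=
  (((PySem.Chars.splitOn pulses.toList "0000000".toList).map (fun w =>
      (((PySem.Chars.splitOn w "000".toList).map
          (fun l => String.ofList (bTok dot.toList dash.toList l l.length))).filter
        (fun m => m ≠ "")))).filter (fun letters => letters ≠ []))

-- ===== PRECONDITION & SPEC =====
def Spec_pulses_to_morse (pulses : String) (dot : String) (dash : String) (out : List (List String)) : Prop := out = pulses_to_morse_alt pulses dot dash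
instance (pulses : String) (dot : String) (dash : String) (out : List (List String)) : Decidable (Spec_pulses_to_morse pulses dot dash out) := by unfold Spec_pulses_to_morse; infer_instance

-- ===== CLAIM (what is proved, stated in full; the proofs are below) =====
def Claim_equal_pulses_to_morse : Prop := ∀ (pulses : String) (dot : String) (dash : String), Dom_pulses_to_morse pulses dot dash → Spec_pulses_to_morse pulses dot dash (pulses_to_morse pulses dot dash)

-- ===== LEMMAS AND PROOFS =====

-- The two tokenizers agree at equal fuel: aLoop at index i equals morse ++ bTok on the
-- suffix letter.drop i.
theorem aLoop_eq_bTok (dt dh letter : List Char) :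
    ∀ (fuel i : Nat) (morse : List Char),
      aLoop dt dh letter fuel i morse = morse ++ bTok dt dh (letter.drop i) fuel := by
  intro fuel
  induction fuel with
  | zero => intro i morse; simp [aLoop, bTok]
  | succ f ih =>
    intro i morse
    by_cases hi : i < letter.length
    · have hs : letter.drop i ≠ [] := by
        simp only [ne_eq, List.drop_eq_nil_iff]; omega
      have hcond : ∀ (p : List Char),
          (PySem.Chars.slice letter (some (i : Int)) (some ((i : Int) + (p.length : Int))) = p)
            ↔ PySem.Chars.startswith (letter.drop i) p = true := by
        intro p
        rw [show PySem.Chars.slice letter (some (i : Int)) (some ((i : Int) + (p.length : Int)))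
              = PySem.List.slice letter (some (i : Int)) (some ((i : Int) + (p.length : Int)))
            from rfl,
          PySem.List.slice_natCast_add, PySem.Chars.startswith_iff, List.prefix_iff_eq_take]
        exact eq_comm
      have hdrop : ∀ (k : Nat), letter.drop (i + k) = (letter.drop i).drop k := by
        intro k; rw [List.drop_drop, Nat.add_comm]
      simp only [aLoop, bTok, if_pos hi, if_neg hs]
      cases hb1 : PySem.Chars.startswith (letter.drop i) dt with
      | true =>
        rw [if_pos ((hcond dt).mpr hb1), ih, hdrop]
        simp
      | false =>
        rw [if_neg (fun h => by simp [(hcond dt).mp h] at hb1)]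
        cases hb2 : PySem.Chars.startswith (letter.drop i) dh with
        | true =>
          rw [if_pos ((hcond dh).mpr hb2), ih, hdrop]
          simp
        | false =>
          rw [if_neg (fun h => by simp [(hcond dh).mp h] at hb2), ih, hdrop]
          simp
    · have hs : letter.drop i = [] := by
        simp only [List.drop_eq_nil_iff]; omega
      simp [aLoop, bTok, hi, hs]

-- A's conditional-append foldl equals B's map-then-filter, when the step function skips
-- exactly the elements whose image is the excluded value e.
theorem foldl_skip_append_eq_filter_map {α β : Type} [DecidableEq β]
    (f : α → β) (e : β) :
    ∀ (xs : List α) (acc : List β),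
      xs.foldl (fun acc x => if f x = e then acc else acc ++ [f x]) acc
        = acc ++ (xs.map f).filter (fun y => y ≠ e)
  | [], acc => by simp
  | x :: xs, acc => by
    simp only [List.foldl_cons, List.map_cons, List.filter_cons]
    by_cases h : f x = e
    · simp [h, foldl_skip_append_eq_filter_map f e xs acc]
    · simp [h, foldl_skip_append_eq_filter_map f e xs (acc ++ [f x])]

-- ===== VERDICT (by name: the statement is the Claim_ definition above) =====
theorem pulses_to_morse_spec : Claim_equal_pulses_to_morse := by
  intro pulses dot dash _
  unfold Spec_pulses_to_morse pulses_to_morse pulses_to_morse_alt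
  -- per-letter result, as B computes it
  set F : List Char → String :=
    fun l => String.ofList (bTok dot.toList dash.toList l l.length) with hF
  -- per-word result, as B computes it
  set G : List Char → List String :=
    fun w => ((PySem.Chars.splitOn w "000".toList).map F).filter (fun m => m ≠ "") with hG
  have hF_empty : F [] = "" := by simp [hF, bTok]
  -- A's inner foldl computes G
  have hinner : ∀ (w : List Char),
      (PySem.Chars.splitOn w "000".toList).foldl (fun morse_letters letter =>
        if letter = [] then morse_letters
        else
          let morse := aLoop dot.toList dash.toList letter letter.length 0 []
          if morse = [] then morse_letters
          else morse_letters ++ [String.ofList morse]) [] = G w := by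
    intro w
    have hstep : (fun (morse_letters : List String) (letter : List Char) =>
        if letter = [] then morse_letters
        else
          let morse := aLoop dot.toList dash.toList letter letter.length 0 []
          if morse = [] then morse_letters
          else morse_letters ++ [String.ofList morse])
        = fun morse_letters letter =>
            if F letter = "" then morse_letters else morse_letters ++ [F letter] := by
      funext ml letter
      by_cases h0 : letter = []
      · subst h0; simp [hF_empty]
      · rw [aLoop_eq_bTok]
        simp only [List.drop_zero, List.nil_append, h0, hF,
          String.ofList_eq_empty_iff, if_false]
    rw [hstep, foldl_skip_append_eq_filter_map F "" _ [], hG, List.nil_append]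
  have hG_empty : G [] = [] := by
    have hsplit : PySem.Chars.splitOn ([] : List Char) ['0', '0', '0'] = [[]] := rfl
    simp [hG, hsplit, hF_empty]
  -- A's outer foldl computes B's filtered map
  have hstep2 : (fun (morse_words : List (List String)) (word : List Char) =>
      if word = [] then morse_words
      else
        if G word = [] then morse_words
        else morse_words ++ [G word])
      = fun morse_words word =>
          if G word = [] then morse_words else morse_words ++ [G word] := by
    funext mw word
    by_cases h0 : word = []
    · subst h0; simp [hG_empty]
    · simp [h0]
  simp only [hinner]
  rw [hstep2, foldl_skip_append_eq_filter_map G [] _ [], List.nil_append]
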